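-- pv_equiv track=rewrite | github.com/Roboparty/roboto_origin | legged_lab/envs/atom01/atom01_interrupt_config.py | generate_joint_mirror
-- ===== SOURCE A (Python) =====
-- def generate_joint_mirror(start_idx):
--     mirror_indices = []
--     mirror_indices.extend([start_idx + 1, start_idx])
--     mirror_indices.append(start_idx + 2)
--     for i in range(start_idx + 3, start_idx + 23, 2):
--         mirror_indices.extend([i + 1, i])
--     mirror_signs = [-1, -1, -1, -1, -1, 1, 1, 1, 1, -1, -1, 1, 1, -1, -1, 1, 1, 1, 1, -1, -1, -1, -1]
--     return mirror_indices, mirror_signs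
-- ===== SOURCE B (Python) =====
-- def generate_joint_mirror(start_idx):
--     def partner(k):
--         # closed-form mirror position: 2 is self-mirrored; the pairs (0,1) and
--         # (3,4),(5,6),...,(21,22) map to each other
--         if k == 2:
--             return 2
--         base = 0 if k < 2 else 3
--         off = k - base
--         return base + off + (1 if off % 2 == 0 else -1)
--     mirror_indices = [start_idx + partner(k) for k in range(23)]
--     mirror_signs = [s for s, n in [(-1, 5), (1, 4), (-1, 2), (1, 2), (-1, 2), (1, 4), (-1, 4)]
--                     for _ in range(n)]
--     return mirror_indices, mirror_signs
-- ===== Notes on version B (the rewrite author's own statement) =====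
-- stated objective: alternative
-- what changed: B computes each entry directly by a closed-form partner(position) function mapped over range(23) and decodes the sign list from a run-length encoding, instead of A's incremental appending of swapped index pairs and a literal sign list.
import Mathlib
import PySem

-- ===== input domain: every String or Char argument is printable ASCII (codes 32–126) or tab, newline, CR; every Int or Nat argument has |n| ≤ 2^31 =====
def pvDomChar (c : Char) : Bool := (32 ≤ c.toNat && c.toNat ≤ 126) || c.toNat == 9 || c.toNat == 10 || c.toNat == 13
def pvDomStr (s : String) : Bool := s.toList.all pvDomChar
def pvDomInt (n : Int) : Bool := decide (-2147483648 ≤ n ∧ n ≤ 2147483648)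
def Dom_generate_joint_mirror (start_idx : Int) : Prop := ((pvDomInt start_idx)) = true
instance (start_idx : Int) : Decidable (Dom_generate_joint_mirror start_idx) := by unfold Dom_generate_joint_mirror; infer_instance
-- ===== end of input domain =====

-- B computes each entry by a closed-form partner(position) map and run-length-decodes the signs, instead of appending swapped pairs.

-- ===== PORT A =====
def generate_joint_mirror (start_idx : Int) : List Int × List Int :=
  let mirror_indices : List Int := []
  let mirror_indices := mirror_indices ++ [start_idx + 1, start_idx]
  let mirror_indices := mirror_indices ++ [start_idx + 2]
  let mirror_indices :=
    (PySem.List.pyRange (start_idx + 3) (start_idx + 23) 2).foldl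
      (fun acc i => acc ++ [i + 1, i]) mirror_indices
  let mirror_signs : List Int := [-1, -1, -1, -1, -1, 1, 1, 1, 1, -1, -1, 1, 1, -1, -1, 1, 1, 1, 1, -1, -1, -1, -1]
  (mirror_indices, mirror_signs)

-- ===== PORT B =====
-- closed-form mirror position: 2 is self-mirrored; pairs (0,1),(3,4),...,(21,22) map to each other
def pvPartner (k : Int) : Int :=
  if k = 2 then 2
  else
    let base : Int := if k < 2 then 0 else 3
    let off := k - base
    base + off + (if PySem.Int.mod off 2 = 0 then 1 else -1)

def generate_joint_mirror_alt (start_idx : Int) : List Int × List Int :=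
  let mirror_indices := (PySem.List.pyRange 0 23 1).map (fun k => start_idx + pvPartner k)
  let mirror_signs :=
    ([((-1 : Int), (5 : Int)), (1, 4), (-1, 2), (1, 2), (-1, 2), (1, 4), (-1, 4)]).foldl
      (fun acc (sn : Int × Int) =>
        acc ++ (PySem.List.pyRange 0 sn.2 1).map (fun _ => sn.1)) []
  (mirror_indices, mirror_signs)

-- ===== PRECONDITION & SPEC =====
def Spec_generate_joint_mirror (start_idx : Int) (out : List Int × List Int) : Prop := out = generate_joint_mirror_alt start_idx
instance (start_idx : Int) (out : List Int × List Int) : Decidable (Spec_generate_joint_mirror start_idx out) := by unfold Spec_generate_joint_mirror; infer_instance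

-- ===== CLAIM =====
def Claim_equal_generate_joint_mirror : Prop := ∀ (start_idx : Int), Dom_generate_joint_mirror start_idx → Spec_generate_joint_mirror start_idx (generate_joint_mirror start_idx)

-- ===== LEMMAS AND PROOFS =====
lemma pvRangeA (s : Int) : PySem.List.pyRange (s + 3) (s + 23) 2 =
    [s + 3, s + 5, s + 7, s + 9, s + 11, s + 13, s + 15, s + 17, s + 19, s + 21] := by
  rw [PySem.List.pyRange_of_pos _ _ (by norm_num : (0:Int) < 2)]
  rw [if_pos (by omega : s + 3 < s + 23)]
  have h : s + 23 - (s + 3) + 2 - 1 = 21 := by ring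
  rw [h]
  show List.map _ (List.range 10) = _
  simp [List.range_succ]
  omega

-- ===== VERDICT =====
theorem generate_joint_mirror_spec : Claim_equal_generate_joint_mirror := by
  intro s _
  show _ = _
  simp only [generate_joint_mirror, generate_joint_mirror_alt, pvRangeA s]
  have h23 : PySem.List.pyRange 0 23 1 = [0, 1, 2, 3, 4, 5, 6, 7, 8, 9, 10, 11, 12,
      13, 14, 15, 16, 17, 18, 19, 20, 21, 22] := by decide
  rw [h23]
  norm_num [pvPartner, List.foldl, PySem.Int.mod, Int.fmod, Int.emod]
  refine ⟨by omega, by decide⟩
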